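-- pv_equiv track=rewrite | github.com/garnet-labs/posthog | posthog/temporal/data_imports/sources/clickhouse/clickhouse.py | _strip_type_modifiers
-- ===== SOURCE A (Python) =====
-- def _strip_type_modifiers(type_name: str) -> tuple[str, bool]:
--     """Strip Nullable(...) and LowCardinality(...) wrappers.
--
--     Returns the inner type and whether the original type was Nullable.
--     LowCardinality alone does not affect nullability, so we recursively
--     unwrap it but never set the nullable flag for it.
--     """
--     nullable = False
--     current = type_name.strip()
--
--     while True:
--         if current.startswith("Nullable(") and current.endswith(")"):
--             nullable = True
--             current = current[len("Nullable(") : -1].strip()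
--         elif current.startswith("LowCardinality(") and current.endswith(")"):
--             current = current[len("LowCardinality(") : -1].strip()
--         else:
--             break
--
--     return current, nullable
-- ===== SOURCE B (Python) =====
-- def _strip_type_modifiers(type_name: str) -> tuple[str, bool]:
--     """Two-pointer window over the original string: move lo/hi indices instead of
--     building intermediate slices; one final slice at the end."""
--     s = type_name
--     lo, hi = 0, len(s)
--     nullable = False
--     while True:
--         while lo < hi and s[lo].isspace():
--             lo += 1
--         while lo < hi and s[hi - 1].isspace():
--             hi -= 1
--         if hi - lo >= 10 and s[lo:lo + 9] == "Nullable(" and s[hi - 1] == ")":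
--             nullable = True
--             lo += 9
--             hi -= 1
--         elif hi - lo >= 16 and s[lo:lo + 15] == "LowCardinality(" and s[hi - 1] == ")":
--             lo += 15
--             hi -= 1
--         else:
--             break
--     return s[lo:hi], nullable
-- ===== Notes on version B (the rewrite author's own statement) =====
-- stated objective: alternative
-- what changed: Replaced A's loop that repeatedly builds stripped slice copies (current = current[...: -1].strip()) by a two-pointer scan: lo/hi indices over the original string are advanced past whitespace and wrapper tokens in place, and a single final slice produces the result.
import Mathlib
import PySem

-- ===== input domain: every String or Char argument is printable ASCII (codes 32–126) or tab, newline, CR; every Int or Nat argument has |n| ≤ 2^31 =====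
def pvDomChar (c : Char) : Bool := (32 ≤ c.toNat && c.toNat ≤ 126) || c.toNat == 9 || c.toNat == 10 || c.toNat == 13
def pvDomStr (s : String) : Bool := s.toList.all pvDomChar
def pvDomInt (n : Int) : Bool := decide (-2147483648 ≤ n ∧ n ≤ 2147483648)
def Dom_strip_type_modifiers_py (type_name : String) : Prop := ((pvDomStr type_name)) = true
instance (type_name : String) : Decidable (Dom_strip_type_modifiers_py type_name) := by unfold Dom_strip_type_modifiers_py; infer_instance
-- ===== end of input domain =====

-- B replaces A's slice-and-restrip loop by a two-pointer window (lo,hi) over the original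
-- string: an alternative decomposition of the same cost (no asymptotic claim).

-- termination helpers, cited by the ports' decreasing_by
theorem pvStripLenLe (cs : List Char) : (PySem.Chars.strip cs).length ≤ cs.length := by
  simp only [PySem.Chars.strip, PySem.Chars.rstrip, PySem.Chars.lstrip, List.length_reverse]
  calc (List.dropWhile _ (List.dropWhile PySem.Chars.isspace cs).reverse).length
      ≤ (List.dropWhile PySem.Chars.isspace cs).reverse.length := List.length_dropWhile_le _ _
    _ = (List.dropWhile PySem.Chars.isspace cs).length := List.length_reverse
    _ ≤ cs.length := List.length_dropWhile_le _ _

-- termination helper: the slice current[n:-1] is strictly shorter (1 ≤ n ≤ |current|)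
theorem pvSliceLt (cs : List Char) (n : Int) (hn : 1 ≤ n) (h : n ≤ cs.length) :
    (PySem.List.slice cs (some n) (some (-1))).length < cs.length := by
  have hne : cs ≠ [] := by intro e; subst e; simp at h; omega
  rw [PySem.List.length_slice]
  simp [PySem.List.clampIdx, hne]
  omega

theorem pvPrefixLen (cs p : List Char) (h : PySem.Chars.startswith cs p = true) :
    p.length ≤ cs.length :=
  ((PySem.Chars.startswith_iff cs p).mp h).length_le

-- ===== PORT A =====
-- the 'while True' loop of A, on code points, state (current, nullable)
def pvLoopA (current : List Char) (nullable : Bool) : List Char × Bool :=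
  if h1 : (PySem.Chars.startswith current "Nullable(".toList &&
           PySem.Chars.endswith current ")".toList) = true then
    pvLoopA (PySem.Chars.strip (PySem.Chars.slice current (some 9) (some (-1)))) true
  else if h2 : (PySem.Chars.startswith current "LowCardinality(".toList &&
                PySem.Chars.endswith current ")".toList) = true then
    pvLoopA (PySem.Chars.strip (PySem.Chars.slice current (some 15) (some (-1)))) nullable
  else (current, nullable)
termination_by current.length
decreasing_by
  · have h9 : 9 ≤ current.length := by
      have := pvPrefixLen current "Nullable(".toList (Bool.and_elim_left h1)
      simpa using this
    calc (PySem.Chars.strip (PySem.Chars.slice current (some 9) (some (-1)))).length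
        ≤ (PySem.Chars.slice current (some 9) (some (-1))).length := pvStripLenLe _
      _ < current.length := by
          have := pvSliceLt current 9 (by omega) (by exact_mod_cast h9)
          simpa using this
  · have h15 : 15 ≤ current.length := by
      have := pvPrefixLen current "LowCardinality(".toList (Bool.and_elim_left h2)
      simpa using this
    calc (PySem.Chars.strip (PySem.Chars.slice current (some 15) (some (-1)))).length
        ≤ (PySem.Chars.slice current (some 15) (some (-1))).length := pvStripLenLe _
      _ < current.length := by
          have := pvSliceLt current 15 (by omega) (by exact_mod_cast h15)
          simpa using this

def strip_type_modifiers_py (type_name : String) : String × Bool :=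
  let r := pvLoopA (PySem.Chars.strip type_name.toList) false
  (String.ofList r.1, r.2)

-- ===== PORT B =====
-- 'while lo < hi and s[lo].isspace(): lo += 1' (s[lo] is in range whenever lo < hi ≤ |s|,
-- so the exact access is cs.getD lo _)
def pvAdvL (cs : List Char) (lo hi : Nat) : Nat :=
  if h : (decide (lo < hi) && PySem.Chars.isspace (cs.getD lo ' ')) = true then
    pvAdvL cs (lo + 1) hi
  else lo
termination_by hi - lo
decreasing_by
  have := of_decide_eq_true (Bool.and_elim_left h); omega

-- 'while lo < hi and s[hi-1].isspace(): hi -= 1'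
def pvAdvR (cs : List Char) (lo hi : Nat) : Nat :=
  if h : (decide (lo < hi) && PySem.Chars.isspace (cs.getD (hi - 1) ' ')) = true then
    pvAdvR cs lo (hi - 1)
  else hi
termination_by hi
decreasing_by
  have := of_decide_eq_true (Bool.and_elim_left h); omega

theorem pvAdvL_ge (cs : List Char) (lo hi : Nat) : lo ≤ pvAdvL cs lo hi := by
  fun_induction pvAdvL cs lo hi <;> omega

theorem pvAdvR_le (cs : List Char) (lo hi : Nat) : pvAdvR cs lo hi ≤ hi := by
  fun_induction pvAdvR cs lo hi <;> omega

-- B's main loop: window [lo, hi) into the fixed string cs; s[a:b] with 0 ≤ a ≤ b = take/drop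
def pvLoopB (cs : List Char) (lo hi : Nat) (nullable : Bool) : String × Bool :=
  -- lo' / hi' below stand for lo, hi after the two whitespace-advancing inner while loops
  if h1 : (decide (10 ≤ pvAdvR cs (pvAdvL cs lo hi) hi - pvAdvL cs lo hi) &&
           decide ((cs.drop (pvAdvL cs lo hi)).take 9 = "Nullable(".toList) &&
           decide (cs.getD (pvAdvR cs (pvAdvL cs lo hi) hi - 1) ' ' = ')')) = true then
    pvLoopB cs (pvAdvL cs lo hi + 9) (pvAdvR cs (pvAdvL cs lo hi) hi - 1) true
  else if h2 : (decide (16 ≤ pvAdvR cs (pvAdvL cs lo hi) hi - pvAdvL cs lo hi) &&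
                decide ((cs.drop (pvAdvL cs lo hi)).take 15 = "LowCardinality(".toList) &&
                decide (cs.getD (pvAdvR cs (pvAdvL cs lo hi) hi - 1) ' ' = ')')) = true then
    pvLoopB cs (pvAdvL cs lo hi + 15) (pvAdvR cs (pvAdvL cs lo hi) hi - 1) nullable
  else (String.ofList ((cs.drop (pvAdvL cs lo hi)).take
          (pvAdvR cs (pvAdvL cs lo hi) hi - pvAdvL cs lo hi)), nullable)
termination_by hi - lo
decreasing_by
  · have hL := pvAdvL_ge cs lo hi
    have hR := pvAdvR_le cs (pvAdvL cs lo hi) hi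
    have h10 := of_decide_eq_true (Bool.and_elim_left (Bool.and_elim_left h1))
    omega
  · have hL := pvAdvL_ge cs lo hi
    have hR := pvAdvR_le cs (pvAdvL cs lo hi) hi
    have h16 := of_decide_eq_true (Bool.and_elim_left (Bool.and_elim_left h2))
    omega

def strip_type_modifiers_py_alt (type_name : String) : String × Bool :=
  pvLoopB type_name.toList 0 type_name.toList.length false

-- ===== PRECONDITION & SPEC =====
def Spec_strip_type_modifiers_py (type_name : String) (out : String × Bool) : Prop := out = strip_type_modifiers_py_alt type_name
instance (type_name : String) (out : String × Bool) : Decidable (Spec_strip_type_modifiers_py type_name out) := by unfold Spec_strip_type_modifiers_py; infer_instance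

-- ===== CLAIM (what is proved, stated in full; the proofs are below) =====
def Claim_equal_strip_type_modifiers_py : Prop := ∀ (type_name : String), Dom_strip_type_modifiers_py type_name → Spec_strip_type_modifiers_py type_name (strip_type_modifiers_py type_name)

-- ===== LEMMAS AND PROOFS =====

-- the window [lo, hi) of cs, the list B's indices denote
def pvWin (cs : List Char) (lo hi : Nat) : List Char := (cs.drop lo).take (hi - lo)

theorem pvWin_nil (cs : List Char) (lo hi : Nat) (h : hi ≤ lo) : pvWin cs lo hi = [] := by
  unfold pvWin
  have : hi - lo = 0 := by omega
  simp [this]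

theorem pvWin_length (cs : List Char) (lo hi : Nat) (_h1 : lo ≤ hi) (h2 : hi ≤ cs.length) :
    (pvWin cs lo hi).length = hi - lo := by
  unfold pvWin; simp; omega

theorem pvWin_cons (cs : List Char) (lo hi : Nat) (h1 : lo < hi) (h2 : hi ≤ cs.length) :
    pvWin cs lo hi = cs[lo]'(by omega) :: pvWin cs (lo + 1) hi := by
  unfold pvWin
  rw [List.drop_eq_getElem_cons (by omega)]
  have e : hi - lo = (hi - (lo + 1)) + 1 := by omega
  rw [e, List.take_succ_cons]

theorem pvWin_snoc (cs : List Char) (lo hi : Nat) (h1 : lo < hi) (h2 : hi ≤ cs.length) :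
    pvWin cs lo hi = pvWin cs lo (hi - 1) ++ [cs[hi - 1]'(by omega)] := by
  unfold pvWin
  have e : hi - lo = (hi - 1 - lo) + 1 := by omega
  rw [e, List.take_add_one]
  have hidx : lo + (hi - 1 - lo) = hi - 1 := by omega
  have hget : (cs.drop lo)[hi - 1 - lo]? = some (cs[hi - 1]'(by omega)) := by
    rw [List.getElem?_drop, hidx]
    exact List.getElem?_eq_getElem (by omega)
  rw [hget]
  rfl

theorem pvAdvL_win (cs : List Char) (lo hi : Nat) (h2 : hi ≤ cs.length) :
    pvWin cs (pvAdvL cs lo hi) hi = List.dropWhile PySem.Chars.isspace (pvWin cs lo hi) := by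
  fun_induction pvAdvL cs lo hi with
  | case1 lo h ih =>
    have hlt : lo < hi := of_decide_eq_true (Bool.and_elim_left h)
    have hsp : PySem.Chars.isspace (cs.getD lo ' ') = true := Bool.and_elim_right h
    rw [List.getD_eq_getElem cs ' ' (by omega)] at hsp
    rw [pvWin_cons cs lo hi hlt h2, List.dropWhile_cons_of_pos hsp]
    exact ih
  | case2 lo h =>
    by_cases hlt : lo < hi
    · have hsp : ¬ PySem.Chars.isspace (cs.getD lo ' ') = true := fun hp =>
        h (by rw [Bool.and_eq_true]; exact ⟨decide_eq_true hlt, hp⟩)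
      rw [List.getD_eq_getElem cs ' ' (by omega)] at hsp
      rw [pvWin_cons cs lo hi hlt h2, List.dropWhile_cons_of_neg hsp,
          ← pvWin_cons cs lo hi hlt h2]
    · rw [pvWin_nil cs lo hi (by omega)]; simp

theorem pvRstrip_snoc_space (xs : List Char) (c : Char) (h : PySem.Chars.isspace c = true) :
    PySem.Chars.rstrip (xs ++ [c]) = PySem.Chars.rstrip xs := by
  simp [PySem.Chars.rstrip, List.dropWhile_cons_of_pos h]

theorem pvRstrip_snoc_nospace (xs : List Char) (c : Char) (h : ¬ PySem.Chars.isspace c = true) :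
    PySem.Chars.rstrip (xs ++ [c]) = xs ++ [c] := by
  simp [PySem.Chars.rstrip, List.dropWhile_cons_of_neg h]

theorem pvAdvR_win (cs : List Char) (lo hi : Nat) (h2 : hi ≤ cs.length) :
    pvWin cs lo (pvAdvR cs lo hi) = PySem.Chars.rstrip (pvWin cs lo hi) := by
  fun_induction pvAdvR cs lo hi with
  | case1 hi h ih =>
    have hlt : lo < hi := of_decide_eq_true (Bool.and_elim_left h)
    have hsp : PySem.Chars.isspace (cs.getD (hi - 1) ' ') = true := Bool.and_elim_right h
    rw [List.getD_eq_getElem cs ' ' (by omega)] at hsp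
    rw [pvWin_snoc cs lo hi hlt h2, pvRstrip_snoc_space _ _ hsp]
    exact ih (by omega)
  | case2 hi h =>
    by_cases hlt : lo < hi
    · have hsp : ¬ PySem.Chars.isspace (cs.getD (hi - 1) ' ') = true := fun hp =>
        h (by rw [Bool.and_eq_true]; exact ⟨decide_eq_true hlt, hp⟩)
      rw [List.getD_eq_getElem cs ' ' (by omega)] at hsp
      rw [pvWin_snoc cs lo hi hlt h2, pvRstrip_snoc_nospace _ _ hsp,
          ← pvWin_snoc cs lo hi hlt h2]
    · rw [pvWin_nil cs lo hi (by omega)]; simp [PySem.Chars.rstrip]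

-- pointer advancing = Python's .strip() on the window
theorem pvStrip_win (cs : List Char) (lo hi : Nat) (h2 : hi ≤ cs.length) :
    PySem.Chars.strip (pvWin cs lo hi)
      = pvWin cs (pvAdvL cs lo hi) (pvAdvR cs (pvAdvL cs lo hi) hi) := by
  rw [PySem.Chars.strip, PySem.Chars.lstrip, ← pvAdvL_win cs lo hi h2,
      ← pvAdvR_win cs (pvAdvL cs lo hi) hi h2]

theorem pvAdvL_le (cs : List Char) (lo hi : Nat) (h : lo ≤ hi) : pvAdvL cs lo hi ≤ hi := by
  fun_induction pvAdvL cs lo hi with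
  | case1 lo h' ih => exact ih (of_decide_eq_true (Bool.and_elim_left h'))
  | case2 lo h' => omega

theorem pvAdvR_ge (cs : List Char) (lo hi : Nat) (h : lo ≤ hi) : lo ≤ pvAdvR cs lo hi := by
  fun_induction pvAdvR cs lo hi with
  | case1 hi h' ih =>
    have := of_decide_eq_true (Bool.and_elim_left h'); exact ih (by omega)
  | case2 hi h' => omega

theorem pvSuffix_singleton (c : Char) (w : List Char) : [c] <:+ w ↔ w.getLast? = some c := by
  induction w using List.reverseRecOn with
  | nil => simp
  | append_singleton l a _ =>
    simp only [List.getLast?_concat, Option.some_inj]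
    constructor
    · rintro ⟨t, ht⟩
      have := congrArg List.getLast? ht
      simpa [List.getLast?_concat] using this.symm
    · rintro rfl; exact ⟨l, rfl⟩

-- A's startswith/endswith test on the (stripped) window = B's index-arithmetic test
theorem pvCond_iff (cs : List Char) (lo hi : Nat) (p : List Char) (hne : p ≠ [])
    (hlast : p.getLast? = some '(') (hlo : lo ≤ hi) (hhi : hi ≤ cs.length) :
    (PySem.Chars.startswith (pvWin cs lo hi) p &&
      PySem.Chars.endswith (pvWin cs lo hi) [')']) = true
    ↔ (p.length + 1 ≤ hi - lo ∧ (cs.drop lo).take p.length = p ∧ cs.getD (hi - 1) ' ' = ')') := by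
  rw [Bool.and_eq_true, PySem.Chars.startswith_iff, PySem.Chars.endswith_iff,
      pvSuffix_singleton]
  have hwlen := pvWin_length cs lo hi hlo hhi
  constructor
  · rintro ⟨hpre, hsuf⟩
    have hple : p.length ≤ hi - lo := hwlen ▸ hpre.length_le
    have hlt : lo < hi := by
      have : 1 ≤ p.length := by cases p with | nil => exact absurd rfl hne | cons a t => simp
      omega
    have hsnoc := pvWin_snoc cs lo hi hlt hhi
    have hlastw : (pvWin cs lo hi).getLast? = some (cs[hi - 1]'(by omega)) := by
      rw [hsnoc, List.getLast?_concat]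
    have hcp : cs[hi - 1]'(by omega) = ')' := by
      rw [hlastw] at hsuf; exact Option.some_inj.mp hsuf
    have hgetD : cs.getD (hi - 1) ' ' = ')' := by
      rw [List.getD_eq_getElem cs ' ' (by omega)]; exact hcp
    have hptake : p = (pvWin cs lo hi).take p.length := List.prefix_iff_eq_take.mp hpre
    have hlen10 : p.length + 1 ≤ hi - lo := by
      rcases Nat.lt_or_ge p.length (hi - lo) with h | h
      · omega
      · exfalso
        have : p.length = hi - lo := by omega
        have hpw : p = pvWin cs lo hi := by
          rw [hptake, this, ← hwlen, List.take_length]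
        rw [hpw, hlastw] at hlast
        have hpar : cs[hi - 1]'(by omega) = '(' := Option.some_inj.mp hlast
        exact absurd (hpar.symm.trans hcp) (by decide)
    refine ⟨hlen10, ?_, hgetD⟩
    have : (cs.drop lo).take p.length = (pvWin cs lo hi).take p.length := by
      unfold pvWin
      rw [List.take_take]
      congr 1; omega
    rw [this, ← hptake]
  · rintro ⟨hlen, htake, hget⟩
    have hplen : 1 ≤ p.length := by cases p with | nil => exact absurd rfl hne | cons a t => simp
    have hlt : lo < hi := by omega
    constructor
    · rw [List.prefix_iff_eq_take]
      have he : (pvWin cs lo hi).take p.length = (cs.drop lo).take p.length := by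
        unfold pvWin; rw [List.take_take]; congr 1; omega
      rw [he, htake]
    · rw [pvWin_snoc cs lo hi hlt hhi, List.getLast?_concat]
      rw [List.getD_eq_getElem cs ' ' (by omega)] at hget
      exact congrArg some hget

-- the Python slice w[a:-1] of a window is the shrunken window
theorem pvSlice_win (cs : List Char) (lo hi : Nat) (a : Nat) (h : a + 1 ≤ hi - lo)
    (hhi : hi ≤ cs.length) :
    PySem.List.slice (pvWin cs lo hi) (some (a : Int)) (some (-1))
      = pvWin cs (lo + a) (hi - 1) := by
  have hwlen : (pvWin cs lo hi).length = hi - lo := pvWin_length cs lo hi (by omega) hhi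
  have hne : (pvWin cs lo hi) ≠ [] := by
    intro e; rw [e] at hwlen; simp at hwlen; omega
  simp only [PySem.List.slice, PySem.List.clampIdx, hwlen]
  have c1 : ¬ ((a : Int) < 0) := by omega
  have c2 : ((-1 : Int) < 0) := by omega
  have c3 : ¬ (((hi - lo : Nat) : Int) + -1 < 0) := by omega
  rw [if_neg c1, if_pos c2, if_neg c3, Int.toNat_natCast]
  have ha : min a (hi - lo) = a := by omega
  have hbv : (((hi - lo : Nat) : Int) + -1).toNat = hi - lo - 1 := by omega
  rw [ha, hbv]
  unfold pvWin
  rw [List.drop_take, List.drop_drop, List.take_take]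
  congr 1
  omega

-- main invariant: B's window loop computes A's slice-and-strip loop on the window
theorem pvMain (cs : List Char) : ∀ (n lo hi : Nat) (b : Bool), lo ≤ hi → hi ≤ cs.length →
    hi - lo < n →
    pvLoopB cs lo hi b
      = (String.ofList (pvLoopA (PySem.Chars.strip (pvWin cs lo hi)) b).1,
         (pvLoopA (PySem.Chars.strip (pvWin cs lo hi)) b).2) := by
  intro n
  induction n with
  | zero => intro lo hi b h1 h2 h3; omega
  | succ n ih =>
    intro lo hi b hlohi hhics hfuel
    rw [pvLoopB.eq_def]
    set lo' := pvAdvL cs lo hi with hlo'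
    set hi' := pvAdvR cs lo' hi with hhi'
    have hLge : lo ≤ lo' := pvAdvL_ge cs lo hi
    have hLle : lo' ≤ hi := pvAdvL_le cs lo hi hlohi
    have hRle : hi' ≤ hi := pvAdvR_le cs lo' hi
    have hRge : lo' ≤ hi' := pvAdvR_ge cs lo' hi hLle
    have hhi'cs : hi' ≤ cs.length := by omega
    have hstrip : PySem.Chars.strip (pvWin cs lo hi) = pvWin cs lo' hi' :=
      pvStrip_win cs lo hi hhics
    rw [pvLoopA.eq_def, hstrip]
    have hcN := pvCond_iff cs lo' hi' "Nullable(".toList (by decide) (by decide) hRge hhi'cs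
    have hcL := pvCond_iff cs lo' hi' "LowCardinality(".toList (by decide) (by decide) hRge hhi'cs
    have hlenN : ("Nullable(".toList : List Char).length = 9 := by decide
    have hlenL : ("LowCardinality(".toList : List Char).length = 15 := by decide
    rw [hlenN] at hcN
    rw [hlenL] at hcL
    by_cases h1 : (decide (10 ≤ hi' - lo') && decide ((cs.drop lo').take 9 = "Nullable(".toList) &&
           decide (cs.getD (hi' - 1) ' ' = ')')) = true
    · have h1' : 10 ≤ hi' - lo' ∧ (cs.drop lo').take 9 = "Nullable(".toList ∧
          cs.getD (hi' - 1) ' ' = ')' := by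
        simp only [Bool.and_eq_true, decide_eq_true_eq] at h1
        exact ⟨h1.1.1, h1.1.2, h1.2⟩
      have hA : (PySem.Chars.startswith (pvWin cs lo' hi') "Nullable(".toList &&
          PySem.Chars.endswith (pvWin cs lo' hi') ")".toList) = true := hcN.mpr h1'
      rw [dif_pos h1, dif_pos hA]
      have hslice : PySem.Chars.slice (pvWin cs lo' hi') (some 9) (some (-1))
          = pvWin cs (lo' + 9) (hi' - 1) := by
        rw [PySem.Chars.slice_eq_listSlice]
        exact pvSlice_win cs lo' hi' 9 (by omega) hhi'cs
      rw [hslice]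
      exact ih (lo' + 9) (hi' - 1) true (by omega) (by omega) (by omega)
    · by_cases h2 : (decide (16 ≤ hi' - lo') &&
          decide ((cs.drop lo').take 15 = "LowCardinality(".toList) &&
          decide (cs.getD (hi' - 1) ' ' = ')')) = true
      · have h2' : 16 ≤ hi' - lo' ∧ (cs.drop lo').take 15 = "LowCardinality(".toList ∧
            cs.getD (hi' - 1) ' ' = ')' := by
          simp only [Bool.and_eq_true, decide_eq_true_eq] at h2
          exact ⟨h2.1.1, h2.1.2, h2.2⟩
        have hA2 : (PySem.Chars.startswith (pvWin cs lo' hi') "LowCardinality(".toList &&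
            PySem.Chars.endswith (pvWin cs lo' hi') ")".toList) = true := hcL.mpr h2'
        have hA1 : ¬ (PySem.Chars.startswith (pvWin cs lo' hi') "Nullable(".toList &&
            PySem.Chars.endswith (pvWin cs lo' hi') ")".toList) = true := by
          intro hA
          exact h1 (by
            obtain ⟨a, b', c⟩ := hcN.mp hA
            rw [Bool.and_eq_true, Bool.and_eq_true]
            exact ⟨⟨decide_eq_true (by omega), decide_eq_true b'⟩, decide_eq_true c⟩)
        rw [dif_neg h1, dif_pos h2, dif_neg hA1, dif_pos hA2]
        have hslice : PySem.Chars.slice (pvWin cs lo' hi') (some 15) (some (-1))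
            = pvWin cs (lo' + 15) (hi' - 1) := by
          rw [PySem.Chars.slice_eq_listSlice]
          exact pvSlice_win cs lo' hi' 15 (by omega) hhi'cs
        rw [hslice]
        exact ih (lo' + 15) (hi' - 1) b (by omega) (by omega) (by omega)
      · have hA1 : ¬ (PySem.Chars.startswith (pvWin cs lo' hi') "Nullable(".toList &&
            PySem.Chars.endswith (pvWin cs lo' hi') ")".toList) = true := by
          intro hA
          exact h1 (by
            obtain ⟨a, b', c⟩ := hcN.mp hA
            rw [Bool.and_eq_true, Bool.and_eq_true]
            exact ⟨⟨decide_eq_true (by omega), decide_eq_true b'⟩, decide_eq_true c⟩)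
        have hA2 : ¬ (PySem.Chars.startswith (pvWin cs lo' hi') "LowCardinality(".toList &&
            PySem.Chars.endswith (pvWin cs lo' hi') ")".toList) = true := by
          intro hA
          exact h2 (by
            obtain ⟨a, b', c⟩ := hcL.mp hA
            rw [Bool.and_eq_true, Bool.and_eq_true]
            exact ⟨⟨decide_eq_true (by omega), decide_eq_true b'⟩, decide_eq_true c⟩)
        rw [dif_neg h1, dif_neg h2, dif_neg hA1, dif_neg hA2]
        rfl

-- ===== VERDICT (by name: the statement is the Claim_ definition above) =====
theorem strip_type_modifiers_py_spec : Claim_equal_strip_type_modifiers_py := by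
  intro type_name _
  unfold Spec_strip_type_modifiers_py strip_type_modifiers_py strip_type_modifiers_py_alt
  have h := pvMain type_name.toList (type_name.toList.length + 1) 0 type_name.toList.length
    false (by omega) (by omega) (by omega)
  have hwin : pvWin type_name.toList 0 type_name.toList.length = type_name.toList := by
    unfold pvWin; simp
  rw [h, hwin]
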